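-- pv_equiv track=rewrite | github.com/Sasmit69/HIT137-Asignment | Qn_2_Task2.py | find_best_shift_and_decrypt
-- ===== SOURCE A (Python) =====
-- from collections import Counter
--
-- def decrypt_caesar_cipher(ciphertext, shift):
--     decrypted_text = ""
--     for char in ciphertext:
--         if char.isalpha():  # Check if the character is an alphabet letter
--             shift_base = 65 if char.isupper() else 97  # Choose base for uppercase or lowercase letters
--             decrypted_char = chr((ord(char) - shift_base - shift) % 26 + shift_base)
--             decrypted_text += decrypted_char  # Append decrypted letter
--         else:
--             decrypted_text += char  # Keep non-letter characters as they are
--     return decrypted_text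
--
-- def score_text(text, common_words):
--     words = text.split()
--     word_count = Counter(words)
--     score = sum(word_count[word] for word in common_words if word in word_count)
--     return score
--
-- def find_best_shift_and_decrypt(ciphertext):
--     common_words = {"the", "be", "to", "of", "and", "a", "in", "that", "have", "I", "it", "for", "not", "on", "with", "he", "as", "you", "do", "at", "this", "but", "we", "his", "from", "they", "say", "her", "she", "or", "an", "will", "my", "one", "all", "would", "there", "their", "what", "so", "up", "out", "if", "about", "who", "get", "which", "go", "me"}
--
--     best_shift = None
--     best_score = 0
--     best_decrypted_text = ""
--
--     for shift in range(1, 26):  # Loop through all possible shift values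
--         decrypted_text = decrypt_caesar_cipher(ciphertext, shift)
--         score = score_text(decrypted_text, common_words)
--         if score > best_score:
--             best_score = score
--             best_shift = shift
--             best_decrypted_text = decrypted_text
--
--     return best_shift, best_decrypted_text
-- ===== SOURCE B (Python) =====
-- def find_best_shift_and_decrypt(ciphertext):
--     common_words = ["the", "be", "to", "of", "and", "a", "in", "that", "have", "I", "it", "for", "not", "on", "with", "he", "as", "you", "do", "at", "this", "but", "we", "his", "from", "they", "say", "her", "she", "or", "an", "will", "my", "one", "all", "would", "there", "their", "what", "so", "up", "out", "if", "about", "who", "get", "which", "go", "me"]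
--
--     def shift_char(c, shift):
--         if c.isalpha():
--             base = 65 if c.isupper() else 97
--             return chr((ord(c) - base + shift) % 26 + base)
--         return c
--
--     # Precompute: encrypted form of each common word under each shift -> shifts
--     table = {}
--     for word in common_words:
--         for shift in range(1, 26):
--             enc = "".join(shift_char(c, shift) for c in word)
--             table.setdefault(enc, []).append(shift)
--
--     # One pass over the ciphertext's tokens, voting for shifts
--     votes = {}
--     for token in ciphertext.split():
--         for shift in table.get(token, []):
--             votes[shift] = votes.get(shift, 0) + 1
--
--     best_shift = None
--     best_score = 0
--     for shift in range(1, 26):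
--         if votes.get(shift, 0) > best_score:
--             best_score = votes.get(shift, 0)
--             best_shift = shift
--
--     if best_shift is None:
--         return None, ""
--     return best_shift, "".join(shift_char(c, -best_shift) for c in ciphertext)
-- ===== Notes on version B (the rewrite author's own statement) =====
-- stated objective: faster
-- what changed: Instead of decrypting the whole text and re-counting common words for each of the 25 shifts, B precomputes a dict mapping every encrypted form of every common word to its shifts, tokenizes the ciphertext once, collects per-shift votes by one dict lookup per token, and decrypts the text once with the winning shift.
import Mathlib
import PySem

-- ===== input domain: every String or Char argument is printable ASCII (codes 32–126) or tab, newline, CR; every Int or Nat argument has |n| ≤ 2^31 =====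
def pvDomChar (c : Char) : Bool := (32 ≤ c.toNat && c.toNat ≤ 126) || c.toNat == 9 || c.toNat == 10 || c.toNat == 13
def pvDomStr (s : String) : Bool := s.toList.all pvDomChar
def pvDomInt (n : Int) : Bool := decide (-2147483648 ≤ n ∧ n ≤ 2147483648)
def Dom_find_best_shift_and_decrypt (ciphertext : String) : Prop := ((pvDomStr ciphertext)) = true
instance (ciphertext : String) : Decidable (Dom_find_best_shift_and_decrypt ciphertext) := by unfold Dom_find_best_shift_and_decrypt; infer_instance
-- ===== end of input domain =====

-- B replaces A's 25 decrypt-everything-and-Counter passes by a precomputed table of the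
-- encrypted forms of the common words: one split of the ciphertext, one table lookup per
-- token to collect votes per shift, and a single final decryption with the winning shift.

-- ===== PORT A =====

-- the common-word set literal of A (a Python set; only consumed order-insensitively)
def pvCommonList : List String := ["the", "be", "to", "of", "and", "a", "in", "that", "have", "I", "it", "for", "not", "on", "with", "he", "as", "you", "do", "at", "this", "but", "we", "his", "from", "they", "say", "her", "she", "or", "an", "will", "my", "one", "all", "would", "there", "their", "what", "so", "up", "out", "if", "about", "who", "get", "which", "go", "me"]

def decrypt_caesar_cipher (ciphertext : String) (shift : Int) : String :=
  String.ofList (ciphertext.toList.foldl (fun acc c =>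
    if PySem.Chars.isalpha c then
      let shift_base : Int := if PySem.Chars.isupper c then 65 else 97
      acc ++ [Char.ofNat (PySem.Int.mod ((c.toNat : Int) - shift_base - shift) 26 + shift_base).toNat]
    else
      acc ++ [c]) [])

def score_text (text : String) (common_words : PySem.Set String) : Int :=
  let words := PySem.Str.split₀ text
  let word_count := PySem.Dict.counter words
  ((common_words.filter (fun w => word_count.contains w)).map (fun w => word_count.getD w 0)).sum

def find_best_shift_and_decrypt (ciphertext : String) : Option Int × String :=
  let common_words : PySem.Set String := PySem.Set.ofList pvCommonList
  let st := (PySem.List.pyRange 1 26 1).foldl (fun st shift =>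
    let decrypted_text := decrypt_caesar_cipher ciphertext shift
    let score := score_text decrypted_text common_words
    if score > st.2.1 then (some shift, score, decrypted_text) else st)
    ((none : Option Int), (0 : Int), "")
  (st.1, st.2.2)

-- ===== PORT B =====

def pvShiftChar (c : Char) (shift : Int) : Char :=
  if PySem.Chars.isalpha c then
    let base : Int := if PySem.Chars.isupper c then 65 else 97
    Char.ofNat (PySem.Int.mod ((c.toNat : Int) - base + shift) 26 + base).toNat
  else c

-- "".join(shift_char(c, shift) for c in word)
def pvEncryptWord (w : String) (shift : Int) : String :=
  String.ofList (w.toList.map (fun c => pvShiftChar c shift))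

def find_best_shift_and_decrypt_alt (ciphertext : String) : Option Int × String :=
  -- table: encrypted form of each common word under each shift -> list of shifts
  let table : PySem.Dict String (List Int) :=
    pvCommonList.foldl (fun d word =>
      (PySem.List.pyRange 1 26 1).foldl (fun d shift =>
        d.modify (pvEncryptWord word shift) [] (fun l => l ++ [shift])) d) PySem.Dict.empty
  -- one pass over the tokens, voting for shifts
  let votes : PySem.Dict Int Int :=
    (PySem.Str.split₀ ciphertext).foldl (fun v token =>
      (table.getD token []).foldl (fun v shift => v.insert shift (v.getD shift 0 + 1)) v)
      PySem.Dict.empty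
  let sel := (PySem.List.pyRange 1 26 1).foldl (fun st shift =>
    if votes.getD shift 0 > st.2 then (some shift, votes.getD shift 0) else st)
    ((none : Option Int), (0 : Int))
  match sel.1 with
  | none => (none, "")
  | some s => (some s, String.ofList (ciphertext.toList.map (fun c => pvShiftChar c (-s))))

-- ===== PRECONDITION & SPEC =====
def Spec_find_best_shift_and_decrypt (ciphertext : String) (out : Option Int × String) : Prop := out = find_best_shift_and_decrypt_alt ciphertext
instance (ciphertext : String) (out : Option Int × String) : Decidable (Spec_find_best_shift_and_decrypt ciphertext out) := by unfold Spec_find_best_shift_and_decrypt; infer_instance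

-- ===== CLAIM (what is proved, stated in full; the proofs are below) =====
def Claim_equal_find_best_shift_and_decrypt : Prop := ∀ (ciphertext : String), Dom_find_best_shift_and_decrypt ciphertext → Spec_find_best_shift_and_decrypt ciphertext (find_best_shift_and_decrypt ciphertext)

-- ===== LEMMAS AND PROOFS =====

theorem pvLetterFacts : ∀ n : Nat, n < 26 →
    (PySem.Chars.isalpha (Char.ofNat (n + 65)) = true ∧
     PySem.Chars.isupper (Char.ofNat (n + 65)) = true ∧
     PySem.Chars.isspace (Char.ofNat (n + 65)) = false ∧
     (Char.ofNat (n + 65)).toNat = n + 65) ∧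
    (PySem.Chars.isalpha (Char.ofNat (n + 97)) = true ∧
     PySem.Chars.isupper (Char.ofNat (n + 97)) = false ∧
     PySem.Chars.isspace (Char.ofNat (n + 97)) = false ∧
     (Char.ofNat (n + 97)).toNat = n + 97) := by decide

theorem pvShiftChar_alpha (c : Char) (s : Int) (h : PySem.Chars.isalpha c = true) :
    PySem.Chars.isalpha (pvShiftChar c s) = true ∧
    PySem.Chars.isupper (pvShiftChar c s) = PySem.Chars.isupper c ∧
    ((pvShiftChar c s).toNat : Int) =
      PySem.Int.mod ((c.toNat : Int) - (if PySem.Chars.isupper c then 65 else 97) + s) 26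
        + (if PySem.Chars.isupper c then 65 else 97) := by
  have h26 : (0:Int) < 26 := by norm_num
  by_cases hu : PySem.Chars.isupper c = true
  · set m := PySem.Int.mod ((c.toNat : Int) - 65 + s) 26 with hm
    have h0 : 0 ≤ m := PySem.Int.mod_nonneg _ h26
    have h1 : m < 26 := PySem.Int.mod_lt _ h26
    have hn : (m + 65).toNat = m.toNat + 65 := by omega
    have hlt : m.toNat < 26 := by omega
    have hmc : (m.toNat : Int) = m := by omega
    have L := (pvLetterFacts m.toNat hlt).1
    have he : pvShiftChar c s = Char.ofNat (m.toNat + 65) := by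
      rw [pvShiftChar, if_pos h]
      show Char.ofNat (PySem.Int.mod ((c.toNat : Int) - (if PySem.Chars.isupper c then 65 else 97) + s) 26 + (if PySem.Chars.isupper c then 65 else 97)).toNat = _
      rw [hu, if_pos rfl, ← hm, hn]
    rw [he, hu, if_pos rfl]
    exact ⟨L.1, L.2.1, by rw [L.2.2.2]; push_cast [hmc]; omega⟩
  · simp only [Bool.not_eq_true] at hu
    set m := PySem.Int.mod ((c.toNat : Int) - 97 + s) 26 with hm
    have h0 : 0 ≤ m := PySem.Int.mod_nonneg _ h26
    have h1 : m < 26 := PySem.Int.mod_lt _ h26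
    have hn : (m + 97).toNat = m.toNat + 97 := by omega
    have hlt : m.toNat < 26 := by omega
    have hmc : (m.toNat : Int) = m := by omega
    have L := (pvLetterFacts m.toNat hlt).2
    have he : pvShiftChar c s = Char.ofNat (m.toNat + 97) := by
      rw [pvShiftChar, if_pos h]
      show Char.ofNat (PySem.Int.mod ((c.toNat : Int) - (if PySem.Chars.isupper c then 65 else 97) + s) 26 + (if PySem.Chars.isupper c then 65 else 97)).toNat = _
      rw [hu]
      simp only [Bool.false_eq_true, if_false]
      rw [← hm, hn]
    rw [he, hu]
    simp only [Bool.false_eq_true, if_false]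
    exact ⟨L.1, L.2.1, by rw [L.2.2.2]; push_cast [hmc]; omega⟩

theorem pvAlpha_code (c : Char) (h : PySem.Chars.isalpha c = true) :
    (65 ≤ c.toNat ∧ c.toNat ≤ 90) ∨ (97 ≤ c.toNat ∧ c.toNat ≤ 122) := by
  have e1 : 'A'.val.toNat = 65 := rfl
  have e2 : 'Z'.val.toNat = 90 := rfl
  have e3 : 'a'.val.toNat = 97 := rfl
  have e4 : 'z'.val.toNat = 122 := rfl
  simp only [PySem.Chars.isalpha, PySem.Chars.isupper, PySem.Chars.islower, Bool.or_eq_true,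
    Bool.and_eq_true, decide_eq_true_eq, Char.le_def, UInt32.le_iff_toNat_le, e1, e2, e3, e4] at h
  exact h.imp id id
theorem pvUpper_code (c : Char) (h : PySem.Chars.isupper c = true) : 65 ≤ c.toNat ∧ c.toNat ≤ 90 := by
  have e1 : 'A'.val.toNat = 65 := rfl
  have e2 : 'Z'.val.toNat = 90 := rfl
  simp only [PySem.Chars.isupper, Bool.and_eq_true, decide_eq_true_eq, Char.le_def,
    UInt32.le_iff_toNat_le, e1, e2] at h
  exact h
theorem pvNotUpper_code (c : Char) (h : PySem.Chars.isalpha c = true)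
    (hu : PySem.Chars.isupper c = false) : 97 ≤ c.toNat ∧ c.toNat ≤ 122 := by
  rcases pvAlpha_code c h with h1 | h1
  · exfalso
    have e1 : 'A'.val.toNat = 65 := rfl
    have e2 : 'Z'.val.toNat = 90 := rfl
    simp only [PySem.Chars.isupper, Bool.and_eq_false_iff, decide_eq_false_iff_not, Char.le_def,
      UInt32.le_iff_toNat_le, e1, e2, not_le] at hu
    unfold Char.toNat at h1
    omega
  · exact h1
theorem pvCharEq (c d : Char) (h : c.toNat = d.toNat) : c = d := by
  apply Char.ext
  exact UInt32.toNat_inj.mp h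

theorem pvShiftChar_zero (c : Char) : pvShiftChar c 0 = c := by
  by_cases h : PySem.Chars.isalpha c = true
  · have H := (pvShiftChar_alpha c 0 h).2.2
    apply pvCharEq
    have hcast : ((pvShiftChar c 0).toNat : Int) = (c.toNat : Int) → (pvShiftChar c 0).toNat = c.toNat := by omega
    apply hcast
    rw [H, PySem.Int.mod_eq_emod_of_pos (by norm_num)]
    by_cases hu : PySem.Chars.isupper c = true
    · have hb := pvUpper_code c hu
      rw [hu, if_pos rfl]
      omega
    · have hb := pvNotUpper_code c h (by simpa using hu)
      simp only [hu]
      simp only [Bool.false_eq_true, if_false]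
      omega
  · simp [pvShiftChar, h]

theorem pvShiftChar_shiftChar (c : Char) (a b : Int) :
    pvShiftChar (pvShiftChar c a) b = pvShiftChar c (a + b) := by
  by_cases h : PySem.Chars.isalpha c = true
  · obtain ⟨ha1, ha2, ha3⟩ := pvShiftChar_alpha c a h
    obtain ⟨hb1, hb2, hb3⟩ := pvShiftChar_alpha (pvShiftChar c a) b ha1
    obtain ⟨hc1, hc2, hc3⟩ := pvShiftChar_alpha c (a + b) h
    apply pvCharEq
    suffices hs : ((pvShiftChar (pvShiftChar c a) b).toNat : Int) = ((pvShiftChar c (a+b)).toNat : Int) by omega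
    rw [hb3, hc3, ha2, ha3]
    rw [PySem.Int.mod_eq_emod_of_pos (by norm_num), PySem.Int.mod_eq_emod_of_pos (by norm_num),
        PySem.Int.mod_eq_emod_of_pos (by norm_num)]
    by_cases hu : PySem.Chars.isupper c = true
    · rw [hu, if_pos rfl]; omega
    · simp only [hu, Bool.false_eq_true, if_false]; omega
  · have he : pvShiftChar c a = c := by simp [pvShiftChar, h]
    rw [he]
    simp [pvShiftChar, h]

theorem pvAlpha_not_space (c : Char) (h : PySem.Chars.isalpha c = true) :
    PySem.Chars.isspace c = false := by
  have := pvAlpha_code c h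
  simp only [PySem.Chars.isspace, Char.toNat,
    Bool.or_eq_false_iff, Bool.and_eq_false_iff, decide_eq_false_iff_not, not_le]
  unfold Char.toNat at this
  omega

theorem pvShiftChar_isspace (c : Char) (s : Int) :
    PySem.Chars.isspace (pvShiftChar c s) = PySem.Chars.isspace c := by
  by_cases h : PySem.Chars.isalpha c = true
  · rw [pvAlpha_not_space _ (pvShiftChar_alpha c s h).1, pvAlpha_not_space _ h]
  · simp [pvShiftChar, h]

theorem pvSplitGo_map (f : Char → Char) (hf : ∀ c, PySem.Chars.isspace (f c) = PySem.Chars.isspace c) :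
    ∀ (l cur : List Char) (acc : List (List Char)),
      PySem.Chars.split₀.go (l.map f) (cur.map f) (acc.map (List.map f)) =
        (PySem.Chars.split₀.go l cur acc).map (List.map f) := by
  intro l
  induction l with
  | nil =>
    intro cur acc
    simp only [List.map_nil, PySem.Chars.split₀.go]
    by_cases hc : cur.isEmpty
    · simp [hc, List.isEmpty_map]
    · simp [hc, List.isEmpty_map, List.map_reverse]
  | cons c rest ih =>
    intro cur acc
    simp only [List.map_cons, PySem.Chars.split₀.go, hf c]
    by_cases hsp : PySem.Chars.isspace c = true
    · simp only [hsp, if_true]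
      by_cases hc : cur.isEmpty
      · have h1 : cur.map f = [] := by
          rw [List.isEmpty_iff] at hc; simp [hc]
        rw [List.isEmpty_map, hc, if_pos rfl, if_pos rfl]
        exact ih [] acc
      · rw [List.isEmpty_map, if_neg hc, if_neg hc]
        have := ih [] ((cur.reverse :: acc))
        simpa [List.map_reverse] using this
    · simp only [hsp, Bool.false_eq_true, if_false]
      exact ih (c :: cur) acc

theorem pvSplit_map (f : Char → Char) (hf : ∀ c, PySem.Chars.isspace (f c) = PySem.Chars.isspace c)
    (l : List Char) :
    PySem.Chars.split₀ (l.map f) = (PySem.Chars.split₀ l).map (List.map f) := by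
  have := pvSplitGo_map f hf l [] []
  simpa [PySem.Chars.split₀] using this

theorem pvDecrypt_eq_map (ciphertext : String) (s : Int) :
    decrypt_caesar_cipher ciphertext s
      = String.ofList (ciphertext.toList.map (fun c => pvShiftChar c (-s))) := by
  unfold decrypt_caesar_cipher
  have hfun : (fun (acc : List Char) (c : Char) =>
      if PySem.Chars.isalpha c then
        let shift_base : Int := if PySem.Chars.isupper c then 65 else 97
        acc ++ [Char.ofNat (PySem.Int.mod ((c.toNat : Int) - shift_base - s) 26 + shift_base).toNat]
      else acc ++ [c])
      = (fun (acc : List Char) (c : Char) => acc ++ [pvShiftChar c (-s)]) := by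
    funext acc c
    by_cases h : PySem.Chars.isalpha c = true
    · simp only [pvShiftChar, h, if_true, sub_eq_add_neg]
    · simp [pvShiftChar, h]
  rw [hfun, PySem.List.foldl_append_singleton_eq_map]
  simp

theorem pvSumCounts (common : List String) (hnd : common.Nodup) (ws : List String) :
    (common.map (fun w => ((ws.count w : Int)))).sum = (ws.countP (fun t => t ∈ common) : Int) := by
  induction ws with
  | nil => simp
  | cons t ws ih =>
    have h1 : (common.map (fun w => (((t :: ws).count w : Int)))).sum
        = (common.map (fun w => ((ws.count w : Int)) + (if w == t then 1 else 0))).sum := by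
      congr 1
      apply List.map_congr_left
      intro w _
      rw [List.count_cons]
      push_cast
      rw [BEq.comm]
    rw [h1, PySem.List.sum_map_add_int, ih, PySem.List.sum_map_ite_one_zero]
    have h2 : common.countP (fun w => w == t) = common.count t := rfl
    rw [List.countP_cons, h2]
    by_cases hm : t ∈ common
    · rw [List.count_eq_one_of_mem hnd hm]
      simp [hm]
    · rw [List.count_eq_zero.mpr hm]
      simp [hm]

theorem pvCommonNodup : pvCommonList.Nodup := by decide

theorem pvSumFilter (l : List String) (p : String → Bool) (f : String → Int) :
    ((l.filter p).map f).sum = (l.map (fun w => if p w then f w else 0)).sum := by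
  induction l with
  | nil => simp
  | cons a t ih =>
    by_cases h : p a
    · simp [h, ih]
    · simp [h, ih]

theorem pvScoreText_eq_countP (text : String) :
    score_text text (PySem.Set.ofList pvCommonList)
      = ((PySem.Str.split₀ text).countP (fun t => t ∈ pvCommonList) : Int) := by
  unfold score_text
  rw [PySem.Set.ofList_eq_self_of_nodup _ pvCommonNodup]
  show ((pvCommonList.filter _).map _).sum = _
  rw [pvSumFilter]
  have h1 : (pvCommonList.map (fun w =>
      if (PySem.Dict.counter (PySem.Str.split₀ text)).contains w
      then (PySem.Dict.counter (PySem.Str.split₀ text)).getD w 0 else 0))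
      = pvCommonList.map (fun w => (((PySem.Str.split₀ text).count w : Int))) := by
    apply List.map_congr_left
    intro w _
    rw [PySem.Dict.getD_counter, PySem.Dict.contains_counter]
    by_cases hm : (PySem.Str.split₀ text).contains w
    · rw [if_pos hm]
    · rw [List.contains_eq_mem] at hm
      rw [if_neg (by simpa using hm), List.count_eq_zero.mpr (by simpa using hm)]
      simp
  rw [h1, pvSumCounts _ pvCommonNodup]

theorem pvScore_eq (text : String) (s : Int) :
    score_text (decrypt_caesar_cipher text s) (PySem.Set.ofList pvCommonList)
      = ((PySem.Str.split₀ text).countP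
          (fun t => String.ofList (t.toList.map (fun c => pvShiftChar c (-s))) ∈ pvCommonList) : Int) := by
  rw [pvScoreText_eq_countP]
  congr 1
  have hsp : PySem.Str.split₀ (decrypt_caesar_cipher text s)
      = ((PySem.Chars.split₀ text.toList).map (List.map (fun c => pvShiftChar c (-s)))).map String.ofList := by
    show ((PySem.Chars.split₀ (decrypt_caesar_cipher text s).toList).map String.ofList) = _
    rw [pvDecrypt_eq_map, String.toList_ofList,
        pvSplit_map _ (fun c => pvShiftChar_isspace c (-s))]
  rw [hsp]
  have hr : PySem.Str.split₀ text = (PySem.Chars.split₀ text.toList).map String.ofList := rfl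
  rw [hr]
  simp only [List.countP_map]
  apply List.countP_congr
  intro tl _
  simp [String.toList_ofList]

theorem pvCountPFlatMap {α β : Type} (p : β → Bool) (l : List α) (f : α → List β) :
    (l.flatMap f).countP p = (l.map (fun a => (f a).countP p)).sum := by
  induction l with
  | nil => simp
  | cons a t ih => simp [List.flatMap_cons, List.countP_append, ih]

theorem pvCountPNodupMem {α : Type} [BEq α] [LawfulBEq α] (l : List α) (hnd : l.Nodup)
    (s : α) (hs : s ∈ l) (q : α → Bool) :
    l.countP (fun x => (x == s) && q x) = if q s then 1 else 0 := by
  induction l with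
  | nil => simp at hs
  | cons a t ih =>
    rw [List.countP_cons]
    rcases List.mem_cons.mp hs with rfl | hst
    · have hnt : s ∉ t := (List.nodup_cons.mp hnd).1
      have : t.countP (fun x => (x == s) && q x) = 0 := by
        rw [List.countP_eq_zero]
        intro x hx
        simp only [Bool.and_eq_true, beq_iff_eq]
        rintro ⟨rfl, -⟩
        exact hnt hx
      rw [this]
      by_cases hq : q s
      · simp [hq]
      · simp [hq]
    · have ha : a ≠ s := by
        rintro rfl
        exact (List.nodup_cons.mp hnd).1 hst
      rw [ih (List.nodup_cons.mp hnd).2 hst]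
      simp [ha]

theorem pvShiftChar_cancel (c : Char) (s : Int) : pvShiftChar (pvShiftChar c s) (-s) = c := by
  rw [pvShiftChar_shiftChar, add_neg_cancel, pvShiftChar_zero]
theorem pvShiftChar_cancel' (c : Char) (s : Int) : pvShiftChar (pvShiftChar c (-s)) s = c := by
  rw [pvShiftChar_shiftChar, neg_add_cancel, pvShiftChar_zero]

theorem pvEnc_eq_iff (w t : String) (s : Int) :
    pvEncryptWord w s = t ↔ w = String.ofList (t.toList.map (fun c => pvShiftChar c (-s))) := by
  constructor
  · rintro rfl
    rw [pvEncryptWord, String.toList_ofList, List.map_map]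
    have : ((fun c => pvShiftChar c (-s)) ∘ fun c => pvShiftChar c s) = id := by
      funext c; exact pvShiftChar_cancel c s
    rw [this, List.map_id, String.ofList_toList]
  · rintro rfl
    rw [pvEncryptWord, String.toList_ofList, List.map_map]
    have : ((fun c => pvShiftChar c s) ∘ fun c => pvShiftChar c (-s)) = id := by
      funext c; exact pvShiftChar_cancel' c s
    rw [this, List.map_id, String.ofList_toList]

theorem pvSumIndicator {α : Type} [BEq α] (l : List α) (x : α) :
    (l.map (fun a => if (a == x) = true then 1 else 0)).sum = l.count x := by
  induction l with
  | nil => simp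
  | cons a t ih => by_cases h : a == x <;> simp [List.count_cons, h, ih, Nat.add_comm]

theorem pvSumIteNat {α : Type} (p : α → Prop) [DecidablePred p] (l : List α) :
    (l.map (fun a => if p a then 1 else 0)).sum = l.countP (fun a => decide (p a)) := by
  induction l with
  | nil => simp
  | cons a t ih => by_cases h : p a <;> simp [h, ih, Nat.add_comm]

theorem pvVotes_eq (text : String) (s : Int) (hs : 1 ≤ s) (hs' : s < 26) :
    (((PySem.Str.split₀ text).foldl (fun v token =>
        ((pvCommonList.foldl (fun d word =>
            (PySem.List.pyRange 1 26 1).foldl (fun d shift =>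
              d.modify (pvEncryptWord word shift) [] (fun l => l ++ [shift])) d)
          PySem.Dict.empty).getD token []).foldl
          (fun v shift => v.insert shift (v.getD shift 0 + 1)) v)
      PySem.Dict.empty).getD s 0)
      = ((PySem.Str.split₀ text).countP
          (fun t => String.ofList (t.toList.map (fun c => pvShiftChar c (-s))) ∈ pvCommonList) : Int) := by
  -- the pair list behind the table
  set pairs : List (String × Int) := pvCommonList.flatMap
    (fun w => (PySem.List.pyRange 1 26 1).map (fun s' => (pvEncryptWord w s', s'))) with hpairs
  -- the table build is a fold over `pairs`
  have htable : (pvCommonList.foldl (fun d word =>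
      (PySem.List.pyRange 1 26 1).foldl (fun d shift =>
        d.modify (pvEncryptWord word shift) [] (fun l => l ++ [shift])) d) PySem.Dict.empty)
      = pairs.foldl (fun d p => d.modify p.1 [] (fun l => l ++ [p.2])) PySem.Dict.empty := by
    rw [hpairs, List.foldl_flatMap]
    apply PySem.List.foldl_congr_mem
    intro d w _
    rw [List.foldl_map]
  -- per-token lookup
  have hlook : ∀ t : String,
      (pairs.foldl (fun d p => d.modify p.1 [] (fun l => l ++ [p.2])) PySem.Dict.empty).getD t []
        = (pairs.filter (fun p => p.1 == t)).map (fun p => p.2) := by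
    intro t
    rw [PySem.Dict.getD_foldl_modify_append]
    simp
  -- per-token vote count
  have hcount : ∀ t : String,
      ((pairs.filter (fun p => p.1 == t)).map (fun p => p.2)).count s
        = (if String.ofList (t.toList.map (fun c => pvShiftChar c (-s))) ∈ pvCommonList then 1 else 0) := by
    intro t
    rw [List.count_eq_countP, List.countP_map, List.countP_filter, hpairs,
        pvCountPFlatMap]
    have hinner : ∀ w ∈ pvCommonList,
        (((PySem.List.pyRange 1 26 1).map (fun s' => (pvEncryptWord w s', s'))).countP
          (fun p => ((fun x => x == s) ∘ Prod.snd) p && (p.1 == t)))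
        = if w == String.ofList (t.toList.map (fun c => pvShiftChar c (-s))) then 1 else 0 := by
      intro w _
      rw [List.countP_map]
      have heq : ((fun (p : String × Int) => ((fun x => x == s) ∘ Prod.snd) p && (p.1 == t)) ∘
          (fun s' => (pvEncryptWord w s', s')))
          = fun s' => (s' == s) && (pvEncryptWord w s' == t) := by
        funext s'; rfl
      rw [heq, pvCountPNodupMem _ (PySem.List.nodup_pyRange_one 1 26) s
        (PySem.List.mem_pyRange_one.mpr ⟨hs, hs'⟩)]
      by_cases he : pvEncryptWord w s = t
      · rw [if_pos (by simpa using he), if_pos (by simp [(pvEnc_eq_iff w t s).mp he])]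
      · rw [if_neg (by simpa using he), if_neg (by
          simp only [beq_iff_eq]
          exact fun hw => he ((pvEnc_eq_iff w t s).mpr hw))]
    rw [List.map_congr_left hinner, pvSumIndicator]
    by_cases hm : String.ofList (t.toList.map (fun c => pvShiftChar c (-s))) ∈ pvCommonList
    · rw [List.count_eq_one_of_mem pvCommonNodup hm, if_pos hm]
    · rw [List.count_eq_zero.mpr hm, if_neg hm]
  -- the votes dict is a counter over the flattened per-token shift lists
  rw [htable]
  simp only [hlook]
  rw [← List.foldl_flatMap, PySem.Dict.getD_foldl_insert_add_one, PySem.Dict.getD_empty, zero_add]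
  have hflat : ((PySem.Str.split₀ text).flatMap
        (fun t => (pairs.filter (fun p => p.1 == t)).map (fun p => p.2))).count s
      = (PySem.Str.split₀ text).countP
          (fun t => String.ofList (t.toList.map (fun c => pvShiftChar c (-s))) ∈ pvCommonList) := by
    rw [List.count_eq_countP, pvCountPFlatMap]
    have hc : ∀ t ∈ PySem.Str.split₀ text,
        ((pairs.filter (fun p => p.1 == t)).map (fun p => p.2)).countP (fun x => x == s)
          = if String.ofList (t.toList.map (fun c => pvShiftChar c (-s))) ∈ pvCommonList then 1 else 0 := by
      intro t _
      rw [← List.count_eq_countP]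
      exact hcount t
    rw [List.map_congr_left hc, pvSumIteNat]
  rw [hflat]

theorem pvSelBSome (g : Int → Int) :
    ∀ (L : List Int) (a : Int) (v : Int),
      (L.foldl (fun st s => if g s > st.2 then (some s, g s) else st) ((some a : Option Int), v)).1.isSome := by
  intro L
  induction L with
  | nil => intro a v; rfl
  | cons b L ih =>
    intro a v
    simp only [List.foldl_cons]
    by_cases hb : g b > v
    · rw [if_pos hb]; exact ih b (g b)
    · rw [if_neg hb]; exact ih a v

theorem pvSel (f g : Int → Int) (dec : Int → String) :
    ∀ (L : List Int) (bs : Option Int) (bv : Int) (bt : String),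
      (∀ x ∈ L, f x = g x) →
      (∀ s0, bs = some s0 → bt = dec s0) →
      (let rA := L.foldl (fun st s => if f s > st.2.1 then (some s, f s, dec s) else st) (bs, bv, bt)
       let rB := L.foldl (fun st s => if g s > st.2 then (some s, g s) else st) (bs, bv)
       rA.1 = rB.1 ∧ rA.2.1 = rB.2 ∧ rA.2.2 = (match rB.1 with | none => bt | some s => dec s)) := by
  intro L
  induction L with
  | nil =>
    intro bs bv bt _ hbt
    refine ⟨rfl, rfl, ?_⟩
    cases bs with
    | none => rfl
    | some s0 => exact hbt s0 rfl
  | cons a L ih =>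
    intro bs bv bt hfg hbt
    simp only [List.foldl_cons]
    rw [hfg a (List.mem_cons_self)]
    by_cases h : g a > bv
    · rw [if_pos h, if_pos h]
      obtain ⟨h1, h2, h3⟩ := ih (some a) (g a) (dec a)
        (fun x hx => hfg x (List.mem_cons_of_mem a hx))
        (fun s0 hs0 => by cases hs0; rfl)
      refine ⟨h1, h2, ?_⟩
      rw [h3]
      cases hB : (L.foldl (fun st s => if g s > st.2 then (some s, g s) else st) (some a, g a)).1 with
      | none =>
        have := pvSelBSome g L a (g a)
        rw [hB] at this
        simp at this
      | some s => rfl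
    · rw [if_neg h, if_neg h]
      exact ih bs bv bt (fun x hx => hfg x (List.mem_cons_of_mem a hx)) hbt

theorem pvAssemble (f g : Int → Int) (dec : Int → String)
    (hfg : ∀ x ∈ PySem.List.pyRange 1 26 1, f x = g x) :
    (let st := (PySem.List.pyRange 1 26 1).foldl
        (fun st s => if f s > st.2.1 then (some s, f s, dec s) else st)
        ((none : Option Int), (0 : Int), "")
     ((st.1, st.2.2) : Option Int × String))
    = (let sel := (PySem.List.pyRange 1 26 1).foldl
        (fun st s => if g s > st.2 then (some s, g s) else st) ((none : Option Int), (0 : Int))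
       match sel.1 with
       | none => (none, "")
       | some s => (some s, dec s)) := by
  obtain ⟨h1, h2, h3⟩ := pvSel f g dec (PySem.List.pyRange 1 26 1) none 0 "" hfg (by rintro s0 ⟨⟩)
  cases hB : ((PySem.List.pyRange 1 26 1).foldl
      (fun st s => if g s > st.2 then (some s, g s) else st) ((none : Option Int), (0:Int))).1 with
  | none =>
    simp only [hB] at h1 h3 ⊢
    exact Prod.ext h1 h3
  | some s =>
    simp only [hB] at h1 h3 ⊢
    exact Prod.ext h1 h3

theorem pvMain (ciphertext : String) :
    find_best_shift_and_decrypt ciphertext = find_best_shift_and_decrypt_alt ciphertext := by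
  unfold find_best_shift_and_decrypt find_best_shift_and_decrypt_alt
  simp only [pvDecrypt_eq_map]
  refine pvAssemble
    (fun s => score_text (String.ofList (ciphertext.toList.map (fun c => pvShiftChar c (-s))))
      (PySem.Set.ofList pvCommonList))
    (fun s => (((PySem.Str.split₀ ciphertext).foldl (fun v token =>
        ((pvCommonList.foldl (fun d word =>
            (PySem.List.pyRange 1 26 1).foldl (fun d shift =>
              d.modify (pvEncryptWord word shift) [] (fun l => l ++ [shift])) d)
          PySem.Dict.empty).getD token []).foldl
          (fun v shift => v.insert shift (v.getD shift 0 + 1)) v)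
      PySem.Dict.empty).getD s 0))
    (fun s => String.ofList (ciphertext.toList.map (fun c => pvShiftChar c (-s))))
    ?_
  intro x hx
  obtain ⟨hx1, hx2⟩ := PySem.List.mem_pyRange_one.mp hx
  show score_text _ _ = _
  rw [← pvDecrypt_eq_map, pvScore_eq]
  exact (pvVotes_eq ciphertext x hx1 hx2).symm

-- ===== VERDICT (by name: the statement is the Claim_ definition above) =====
theorem find_best_shift_and_decrypt_spec : Claim_equal_find_best_shift_and_decrypt := by
  intro ciphertext _
  exact pvMain ciphertext
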